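-- pv_equiv track=rewrite | github.com/PS229397/A.I.N.-Reborn | ain/pipeline.py | _next_stage_after
-- ===== SOURCE A (Python) =====
-- STAGES = [
--     "idle",
--     "scanning",
--     "architecture",
--     "user_context",
--     "planning_questions",
--     "planning_answers",
--     "planning_generation",
--     "task_creation",
--     "waiting_approval",
--     "implementation",
--     "validation",
--     "done",
-- ]
--
-- def _next_stage_after(stage: str) -> str:
--     try:
--         idx = STAGES.index(stage)
--     except ValueError:
--         return "scanning"
--     for candidate in STAGES[idx + 1 :]:
--         if candidate not in {"idle", "done"}:
--             return candidate
--     return "done"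
-- ===== SOURCE B (Python) =====
-- STAGES = [
--     "idle",
--     "scanning",
--     "architecture",
--     "user_context",
--     "planning_questions",
--     "planning_answers",
--     "planning_generation",
--     "task_creation",
--     "waiting_approval",
--     "implementation",
--     "validation",
--     "done",
-- ]
--
-- def _next_stage_after(stage: str) -> str:
--     if stage not in STAGES:
--         return "scanning"
--     nxt = STAGES.index(stage) + 1
--     if nxt >= len(STAGES) or STAGES[nxt] == "done":
--         return "done"
--     return STAGES[nxt]
-- ===== Notes on version B (the rewrite author's own statement) =====
-- stated objective: simpler
-- what changed: Replaces the forward-scanning loop over STAGES[idx+1:] with a single index+1 step and one check for 'done' (valid because 'idle' only occurs at index 0).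
import Mathlib
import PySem

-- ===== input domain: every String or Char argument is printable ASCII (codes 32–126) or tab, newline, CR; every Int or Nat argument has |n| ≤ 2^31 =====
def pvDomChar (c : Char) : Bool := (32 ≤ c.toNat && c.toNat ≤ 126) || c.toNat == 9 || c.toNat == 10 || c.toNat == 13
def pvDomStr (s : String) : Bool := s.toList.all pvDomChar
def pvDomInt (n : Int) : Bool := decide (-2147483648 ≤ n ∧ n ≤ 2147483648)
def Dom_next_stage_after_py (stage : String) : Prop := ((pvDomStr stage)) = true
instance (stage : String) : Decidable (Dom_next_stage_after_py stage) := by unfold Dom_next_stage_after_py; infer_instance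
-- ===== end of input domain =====

-- B replaces A's forward scan over STAGES[idx+1:] by a single idx+1 lookup plus a 'done' check (simpler; 'idle' only occurs at index 0).

-- ===== PORT A =====
def pvStages : List String :=
  ["idle", "scanning", "architecture", "user_context", "planning_questions",
   "planning_answers", "planning_generation", "task_creation", "waiting_approval",
   "implementation", "validation", "done"]

-- the for-loop with early return: first candidate not in {"idle","done"}, else "done"
def pvLoopA : List String → String
  | [] => "done"
  | c :: rest => if ¬(c = "idle" ∨ c = "done") then c else pvLoopA rest

def next_stage_after_py (stage : String) : String :=
  match PySem.List.index? pvStages stage with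
  | none => "scanning"                      -- except ValueError
  | some idx => pvLoopA (PySem.List.slice pvStages (some ((idx : Int) + 1)) none)

-- ===== PORT B =====
def next_stage_after_py_alt (stage : String) : String :=
  if ¬ (stage ∈ pvStages) then "scanning"
  else
    let nxt := ((PySem.List.index? pvStages stage).getD 0) + 1
    if nxt ≥ pvStages.length ∨ PySem.List.pyGet? pvStages (nxt : Int) = some "done" then "done"
    else (PySem.List.pyGet? pvStages (nxt : Int)).getD ""

-- ===== PRECONDITION & SPEC =====
def Spec_next_stage_after_py (stage : String) (out : String) : Prop := out = next_stage_after_py_alt stage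
instance (stage : String) (out : String) : Decidable (Spec_next_stage_after_py stage out) := by unfold Spec_next_stage_after_py; infer_instance

-- ===== CLAIM (what is proved, stated in full; the proofs are below) =====
def Claim_equal_next_stage_after_py : Prop := ∀ (stage : String), Dom_next_stage_after_py stage → Spec_next_stage_after_py stage (next_stage_after_py stage)

-- ===== LEMMAS AND PROOFS =====

theorem pv_not_mem_case (stage : String) (h : stage ∉ pvStages) :
    next_stage_after_py stage = next_stage_after_py_alt stage := by
  unfold next_stage_after_py next_stage_after_py_alt
  rw [(PySem.List.index?_eq_none_iff pvStages stage).mpr h]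
  simp [h]

-- ===== VERDICT (by name: the statement is the Claim_ definition above) =====
theorem next_stage_after_py_spec : Claim_equal_next_stage_after_py := by
  intro stage _
  unfold Spec_next_stage_after_py
  by_cases h : stage ∈ pvStages
  · simp only [pvStages, List.mem_cons, List.not_mem_nil, or_false] at h
    rcases h with h | h | h | h | h | h | h | h | h | h | h | h <;> subst h <;> decide
  · exact pv_not_mem_case stage h
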